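-- pv_equiv track=rewrite | github.com/ablab/stringdecomposer | sd/scripts/calc_statistic/BuildDualGraph.py | diffcenpos
-- ===== SOURCE A (Python) =====
-- def diffcenpos(cenv1, cenv2):
--     mx1 = (0, 0)
--     mx2 = (0, 0)
--
--     for i in range(len(cenv1)):
--         for j in range(len(cenv1[0])):
--             if cenv1[i][j] > cenv1[mx1[0]][mx1[1]]:
--                 mx1 = (i, j)
--
--
--     for i in range(len(cenv2)):
--         for j in range(len(cenv2[0])):
--             if cenv2[i][j] > cenv2[mx2[0]][mx2[1]]:
--                 mx2 = (i, j)
--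
--     return mx1[0] != mx2[0] and mx1[1] != mx2[1]
-- ===== SOURCE B (Python) =====
-- def diffcenpos(cenv1, cenv2):
--     def argmax(m):
--         w = len(m[0]) if m else 0
--         flat = [m[i][j] for i in range(len(m)) for j in range(w)]
--         if not flat:
--             return (0, 0)
--         idx = flat.index(max(flat))
--         return divmod(idx, w)
--     mx1 = argmax(cenv1)
--     mx2 = argmax(cenv2)
--     return mx1[0] != mx2[0] and mx1[1] != mx2[1]
-- ===== Notes on version B (the rewrite author's own statement) =====
-- stated objective: idiomatic
-- what changed: Replaces the two position-tracking nested scans with a single helper argmax(m) that flattens the matrix row-major, takes flat.index(max(flat)) and recovers the coordinates with divmod.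
import Mathlib
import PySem

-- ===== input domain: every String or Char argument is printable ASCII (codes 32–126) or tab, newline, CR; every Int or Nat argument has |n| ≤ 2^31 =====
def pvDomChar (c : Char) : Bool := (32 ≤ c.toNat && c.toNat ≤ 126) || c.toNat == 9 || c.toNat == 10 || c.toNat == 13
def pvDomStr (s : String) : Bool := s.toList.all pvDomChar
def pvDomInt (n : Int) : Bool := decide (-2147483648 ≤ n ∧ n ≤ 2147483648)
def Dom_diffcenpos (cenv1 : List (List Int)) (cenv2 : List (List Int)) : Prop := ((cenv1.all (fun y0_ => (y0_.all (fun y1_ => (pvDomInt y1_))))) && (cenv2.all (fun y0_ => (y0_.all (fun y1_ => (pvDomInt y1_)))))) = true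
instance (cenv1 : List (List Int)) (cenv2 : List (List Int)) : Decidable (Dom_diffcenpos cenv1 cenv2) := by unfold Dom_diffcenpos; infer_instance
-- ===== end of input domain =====

-- B replaces A's two position-tracking nested scans with a helper argmax: flatten the
-- matrix row-major, take flat.index(max(flat)), recover coordinates with divmod (idiomatic).

-- ===== PORT A =====
-- mx scan of one matrix; indices kept as Nat (Python range indices are non-negative);
-- out-of-range reads (excluded by Pre_) default to 0 / [].
def pvScanA (m : List (List Int)) : Nat × Nat :=
  (List.range m.length).foldl (fun mx i =>
    (List.range (m.headD []).length).foldl (fun mx j =>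
      if (m.getD i []).getD j 0 > (m.getD mx.1 []).getD mx.2 0 then (i, j) else mx) mx)
    ((0 : Nat), (0 : Nat))

def diffcenpos (cenv1 : List (List Int)) (cenv2 : List (List Int)) : Bool :=
  let mx1 := pvScanA cenv1
  let mx2 := pvScanA cenv2
  (mx1.1 != mx2.1) && (mx1.2 != mx2.2)

-- ===== PORT B =====
-- flat = [m[i][j] for i in range(len(m)) for j in range(w)]; then index-of-max + divmod.
def pyArgmax (m : List (List Int)) : Nat × Nat :=
  let w := (m.headD []).length
  let flat := (List.range m.length).flatMap (fun i =>
    (List.range w).map (fun j => (m.getD i []).getD j 0))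
  match PySem.List.max? flat (fun x => x) with
  | none => (0, 0)
  | some mv => let idx := (PySem.List.index? flat mv).getD 0; (idx / w, idx % w)

def diffcenpos_alt (cenv1 : List (List Int)) (cenv2 : List (List Int)) : Bool :=
  let mx1 := pyArgmax cenv1
  let mx2 := pyArgmax cenv2
  (mx1.1 != mx2.1) && (mx1.2 != mx2.2)

-- ===== PRECONDITION & SPEC =====
-- Pre_ excludes exactly the jagged matrices on which Python A raises IndexError:
-- some row shorter than the first row (row-0 width indexes every row).
def Pre_diffcenpos (cenv1 : List (List Int)) (cenv2 : List (List Int)) : Prop :=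
  (∀ r ∈ cenv1, (cenv1.headD []).length ≤ r.length) ∧
  (∀ r ∈ cenv2, (cenv2.headD []).length ≤ r.length)
instance (cenv1 : List (List Int)) (cenv2 : List (List Int)) : Decidable (Pre_diffcenpos cenv1 cenv2) := by unfold Pre_diffcenpos; infer_instance

def pvWitness_diffcenpos : List (List Int) × List (List Int) := ([[1, 5], [3, 2]], [[4, 0], [0, 9]])

def Spec_diffcenpos (cenv1 : List (List Int)) (cenv2 : List (List Int)) (out : Bool) : Prop := out = diffcenpos_alt cenv1 cenv2
instance (cenv1 : List (List Int)) (cenv2 : List (List Int)) (out : Bool) : Decidable (Spec_diffcenpos cenv1 cenv2 out) := by unfold Spec_diffcenpos; infer_instance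

-- ===== CLAIM (what is proved, stated in full; the proofs are below) =====
def Claim_equal_diffcenpos : Prop := ∀ (cenv1 : List (List Int)) (cenv2 : List (List Int)), Dom_diffcenpos cenv1 cenv2 → Pre_diffcenpos cenv1 cenv2 → Spec_diffcenpos cenv1 cenv2 (diffcenpos cenv1 cenv2)

-- ===== LEMMAS AND PROOFS =====

-- the flat list B builds
def pvFlat (m : List (List Int)) : List Int :=
  (List.range m.length).flatMap (fun i =>
    (List.range (m.headD []).length).map (fun j => (m.getD i []).getD j 0))

-- the index-level scan: running first-argmax over flat indices
def pvScanN (xs : List Int) (N : Nat) : Nat :=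
  (List.range N).foldl (fun b k => if xs.getD k 0 > xs.getD b 0 then k else b) 0

lemma pvScanN_succ (xs : List Int) (N : Nat) :
    pvScanN xs (N + 1) =
      if xs.getD N 0 > xs.getD (pvScanN xs N) 0 then N else pvScanN xs N := by
  simp [pvScanN, List.range_succ]

-- invariant of the scan: result is in range, dominates all seen values,
-- and strictly dominates all earlier positions (first argmax)
lemma pvScanN_spec (xs : List Int) :
    ∀ N : Nat, pvScanN xs (N + 1) < N + 1 ∧
      (∀ k < N + 1, xs.getD k 0 ≤ xs.getD (pvScanN xs (N + 1)) 0) ∧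
      (∀ k < pvScanN xs (N + 1), xs.getD k 0 < xs.getD (pvScanN xs (N + 1)) 0) := by
  intro N
  induction N with
  | zero =>
    have h0 : pvScanN xs 1 = 0 := by simp [pvScanN]
    rw [h0]
    refine ⟨by omega, ?_, by omega⟩
    intro k hk
    have : k = 0 := by omega
    subst this; exact le_refl _
  | succ N ih =>
    obtain ⟨h1, h2, h3⟩ := ih
    rw [pvScanN_succ]
    split_ifs with h
    · refine ⟨by omega, ?_, ?_⟩
      · intro k hk
        rcases Nat.lt_succ_iff_lt_or_eq.mp hk with hk' | hk'
        · exact le_of_lt (lt_of_le_of_lt (h2 k hk') h)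
        · simp [hk']
      · intro k hk
        exact lt_of_le_of_lt (h2 k hk) h
    · refine ⟨by omega, ?_, h3⟩
      intro k hk
      rcases Nat.lt_succ_iff_lt_or_eq.mp hk with hk' | hk'
      · exact h2 k hk'
      · subst hk'; omega

-- a row-major double comprehension over ranges, as a map over decoded flat indices
lemma pvFlatMapRange {α : Type} (w : Nat) (hw : 0 < w) (g : Nat → Nat → α) :
    ∀ n, (List.range n).flatMap (fun i => (List.range w).map (g i)) =
      (List.range (n * w)).map (fun k => g (k / w) (k % w)) := by
  intro n
  induction n with
  | zero => simp
  | succ n ih =>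
    rw [List.range_succ, List.flatMap_append, ih, Nat.succ_mul, List.range_add,
      List.map_append]
    congr 1
    simp only [List.flatMap_singleton, List.map_map]
    apply List.map_congr_left
    intro j hj
    simp only [List.mem_range] at hj
    simp [Function.comp, Nat.mul_comm n w, Nat.mul_add_div hw,
      Nat.div_eq_of_lt hj, Nat.mod_eq_of_lt hj]

lemma pvFlat_eq_map (m : List (List Int)) (hw : 0 < (m.headD []).length) :
    pvFlat m = (List.range (m.length * (m.headD []).length)).map
      (fun k => (m.getD (k / (m.headD []).length) []).getD (k % (m.headD []).length) 0) := by
  rw [pvFlat]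
  exact pvFlatMapRange _ hw _ _

lemma pvFlat_length (m : List (List Int)) :
    (pvFlat m).length = m.length * (m.headD []).length := by
  rcases Nat.eq_zero_or_pos (m.headD []).length with hw | hw
  · simp [pvFlat, hw]
  · rw [pvFlat_eq_map m hw]; simp

lemma pvFlat_getD (m : List (List Int)) (k : Nat)
    (hk : k < m.length * (m.headD []).length) :
    (pvFlat m).getD k 0 =
      (m.getD (k / (m.headD []).length) []).getD (k % (m.headD []).length) 0 := by
  have hw : 0 < (m.headD []).length := by
    rcases Nat.eq_zero_or_pos (m.headD []).length with h | h
    · rw [h, Nat.mul_zero] at hk; omega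
    · exact h
  rw [pvFlat_eq_map m hw]
  rw [List.getD_eq_getElem _ _ (by simpa using hk)]
  simp

-- A's nested scan, rewritten as a scan over flat indices then decoded
lemma pvScanA_eq_decode (m : List (List Int)) (hn : 0 < m.length)
    (hw : 0 < (m.headD []).length) :
    pvScanA m = (pvScanN (pvFlat m) (m.length * (m.headD []).length) / (m.headD []).length,
                 pvScanN (pvFlat m) (m.length * (m.headD []).length) % (m.headD []).length) := by
  -- step 1: nested foldl = foldl over the decoded pair list
  have h2 : (List.range m.length).flatMap
      (fun i => (List.range (m.headD []).length).map (fun j => (i, j))) =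
      (List.range (m.length * (m.headD []).length)).map
        (fun k => (k / (m.headD []).length, k % (m.headD []).length)) :=
    pvFlatMapRange _ hw _ _
  have h1 : pvScanA m = ((List.range m.length).flatMap (fun i =>
      (List.range (m.headD []).length).map (fun j => (i, j)))).foldl
      (fun mx p => if (m.getD p.1 []).getD p.2 0 > (m.getD mx.1 []).getD mx.2 0
        then p else mx) ((0 : Nat), (0 : Nat)) := by
    rw [List.foldl_flatMap]
    simp only [List.foldl_map]
    rfl
  -- step 2: fold of decoded indices = decode of index fold
  rw [h1, h2, List.foldl_map]
  have key : ∀ (l : List Nat), (∀ k ∈ l, k < m.length * (m.headD []).length) →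
      ∀ b, b < m.length * (m.headD []).length →
      l.foldl (fun mx k => if (m.getD (k / (m.headD []).length) []).getD (k % (m.headD []).length) 0 >
          (m.getD mx.1 []).getD mx.2 0 then (k / (m.headD []).length, k % (m.headD []).length) else mx)
        (b / (m.headD []).length, b % (m.headD []).length) =
      (l.foldl (fun b k => if (pvFlat m).getD k 0 > (pvFlat m).getD b 0 then k else b) b / (m.headD []).length,
       l.foldl (fun b k => if (pvFlat m).getD k 0 > (pvFlat m).getD b 0 then k else b) b % (m.headD []).length) := by
    intro l
    induction l with
    | nil => intro _ b hb; simp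
    | cons a t ih =>
      intro hmem b hb
      simp only [List.foldl_cons]
      rw [pvFlat_getD m a (hmem a (List.mem_cons_self ..)), pvFlat_getD m b hb]
      split_ifs with h
      · exact ih (fun k hk => hmem k (List.mem_cons_of_mem _ hk))
          a (hmem a (List.mem_cons_self ..))
      · exact ih (fun k hk => hmem k (List.mem_cons_of_mem _ hk)) b hb
  have hN : 0 < m.length * (m.headD []).length := Nat.mul_pos hn hw
  have h0 : ((0 : Nat), (0 : Nat)) =
      ((0 / (m.headD []).length : Nat), (0 % (m.headD []).length : Nat)) := by simp
  rw [h0, key (List.range (m.length * (m.headD []).length)) (by simp) 0 hN]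
  rfl

-- B's index: the index? of the max equals the scan result (both are the first argmax)
lemma pyArgmax_eq_pvScanA (m : List (List Int)) : pyArgmax m = pvScanA m := by
  generalize hwv : (m.headD []).length = w
  rcases Nat.eq_zero_or_pos m.length with hn | hn
  · -- no rows: both (0,0)
    have hm : m = [] := List.eq_nil_of_length_eq_zero hn
    subst hm
    simp [pyArgmax, pvScanA, PySem.List.max?]
  rcases Nat.eq_zero_or_pos w with hw | hw
  · -- zero width: flat empty, A's inner loops empty
    have hA : pvScanA m = (0, 0) := by
      rw [pvScanA, hwv, hw]
      simp
    rw [hA, pyArgmax, hwv, hw]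
    simp only [List.range_zero, List.map_nil]
    rw [show (List.range m.length).flatMap (fun _ => ([] : List Int)) = []
      from List.flatMap_eq_nil_iff.mpr (by simp)]
    simp [PySem.List.max?]
  -- main case
  have hN : 0 < m.length * w := Nat.mul_pos hn hw
  have hflat : pvFlat m = (List.range m.length).flatMap (fun i =>
      (List.range w).map (fun j => (m.getD i []).getD j 0)) := by
    rw [pvFlat, hwv]
  have hlen : (pvFlat m).length = m.length * w := by rw [pvFlat_length, hwv]
  have hne : pvFlat m ≠ [] := by
    apply List.ne_nil_of_length_pos
    rw [hlen]; exact Nat.mul_pos hn hw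
  obtain ⟨mv, hmv⟩ : ∃ mv, PySem.List.max? (pvFlat m) (fun x => x) = some mv := by
    rcases h : PySem.List.max? (pvFlat m) (fun x => x) with _ | mv
    · exact absurd ((PySem.List.max?_eq_none_iff _ _).mp h) hne
    · exact ⟨mv, rfl⟩
  have hmem : mv ∈ pvFlat m := PySem.List.max?_mem hmv
  obtain ⟨idx, hidx⟩ : ∃ idx, PySem.List.index? (pvFlat m) mv = some idx := by
    rcases h : PySem.List.index? (pvFlat m) mv with _ | idx
    · exact absurd ((PySem.List.index?_eq_none_iff _ _).mp h) (by simpa using hmem)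
    · exact ⟨idx, rfl⟩
  obtain ⟨hidxlt, hval, hfirst⟩ := PySem.List.getElem_of_index?_eq_some hidx
  rw [pvScanA_eq_decode m hn (by omega)]
  rw [pyArgmax, hwv, ← hflat, hmv]
  simp only [hidx, Option.getD_some]
  -- both idx and the scan result are the first argmax of pvFlat: they are equal
  have hNsub : m.length * w = (m.length * w - 1) + 1 := by omega
  obtain ⟨s1, s2, s3⟩ := pvScanN_spec (pvFlat m) (m.length * w - 1)
  rw [← hNsub] at s1 s2 s3
  set r := pvScanN (pvFlat m) (m.length * w) with hr
  have hgetD : ∀ k (h : k < (pvFlat m).length), (pvFlat m).getD k 0 = (pvFlat m)[k] := by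
    intro k h; rw [List.getD_eq_getElem _ _ h]
  have hmax : ∀ x ∈ pvFlat m, x ≤ mv := fun x hx => PySem.List.max?_isMax hmv x hx
  have hre : r = idx := by
    rcases Nat.lt_trichotomy r idx with h | h | h
    · -- r < idx: flat[r] ≠ mv but flat[r] is a max: contradiction
      exfalso
      have h1 : (pvFlat m)[r]'(by omega) ≠ mv := hfirst r h
      have h2 : ∀ k < m.length * w, (pvFlat m).getD k 0 ≤ (pvFlat m).getD r 0 := s2
      have h3 : (pvFlat m).getD idx 0 ≤ (pvFlat m).getD r 0 := h2 idx (by omega)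
      rw [hgetD idx hidxlt, hgetD r (by omega), hval] at h3
      have h4 : (pvFlat m)[r]'(by omega) ≤ mv :=
        hmax _ (List.getElem_mem _)
      exact h1 (le_antisymm h4 h3)
    · exact h
    · -- idx < r: flat[idx] = mv strictly less than flat[r] ≤ mv: contradiction
      exfalso
      have h1 : (pvFlat m).getD idx 0 < (pvFlat m).getD r 0 := s3 idx h
      rw [hgetD idx hidxlt, hgetD r (by omega), hval] at h1
      have h2 : (pvFlat m)[r]'(by omega) ≤ mv :=
        hmax _ (List.getElem_mem _)
      omega
  rw [hre]

-- ===== VERDICT (by name: the statement is the Claim_ definition above) =====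
theorem diffcenpos_spec : Claim_equal_diffcenpos := by
  intro cenv1 cenv2 _ _
  unfold Spec_diffcenpos diffcenpos diffcenpos_alt
  rw [pyArgmax_eq_pvScanA, pyArgmax_eq_pvScanA]
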